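-- pv_equiv track=rewrite | github.com/kaospr/hackathon-tt-py | tt/tt/ts_parser.py | _skip_param_list
-- ===== SOURCE A (Python) =====
-- def _skip_param_list(content: str, pos: int) -> int | None:
--     """Balance parentheses to skip past the parameter list."""
--     depth = 1
--     i = pos
--     length = len(content)
--     while i < length and depth > 0:
--         ch = content[i]
--         if ch == "(":
--             depth += 1
--         elif ch == ")":
--             depth -= 1
--         elif ch in ("'", '"', "`"):
--             i = _skip_string(content, i)
--             continue
--         i += 1
--     return i if i < length else None
--
-- def _skip_string(content: str, pos: int) -> int:
--     """
--     Skip a string literal starting at *pos*.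
--     Handles single-quoted, double-quoted, and template literals.
--     Returns the index after the closing quote.
--     """
--     quote = content[pos]
--     i = pos + 1
--     length = len(content)
--
--     if quote == "`":
--         # Template literal -- need to handle ${...} expressions
--         depth = 0
--         while i < length:
--             ch = content[i]
--             if ch == "\\" and i + 1 < length:
--                 i += 2
--                 continue
--             if ch == "`" and depth == 0:
--                 return i + 1
--             if ch == "$" and i + 1 < length and content[i + 1] == "{":
--                 depth += 1
--                 i += 2
--                 continue
--             if ch == "}" and depth > 0:
--                 depth -= 1
--             i += 1
--         return i
--
--     # Single or double quoted string
--     while i < length: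
--         ch = content[i]
--         if ch == "\\" and i + 1 < length:
--             i += 2
--             continue
--         if ch == quote:
--             return i + 1
--         i += 1
--     return i
-- ===== SOURCE B (Python) =====
-- def _skip_param_list(content: str, pos: int) -> int | None:
--     """Balance parentheses to skip past the parameter list.
--
--     Two staged passes instead of one loop with a helper: pass 1 masks out string
--     literals by collecting the indices of all code (non-literal) characters from
--     pos onward, using one unified literal scanner; pass 2 counts parentheses
--     over that index list only.
--     """
--     length = len(content)
--
--     # pass 1: indices of characters examined in code context
--     code = []
--     i = pos
--     while i < length:
--         ch = content[i]
--         if ch == "'" or ch == '"' or ch == "`":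
--             i = _literal_end(content, i, length)
--         else:
--             code.append(i)
--             i += 1
--
--     # pass 2: parenthesis counting over code positions only
--     depth = 1
--     for p in code:
--         ch = content[p]
--         if ch == "(":
--             depth += 1
--         elif ch == ")":
--             depth -= 1
--             if depth == 0:
--                 return p + 1 if p + 1 < length else None
--     return None
--
--
-- def _literal_end(content: str, i: int, length: int) -> int:
--     """Index just past the literal starting at i (or length if unterminated)."""
--     q = content[i]
--     tmpl = q == "`"
--     d = 0
--     j = i + 1
--     while j < length:
--         c = content[j]
--         if c == "\\" and j + 1 < length:
--             j += 2
--         elif c == q and d == 0: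
--             return j + 1
--         elif tmpl and c == "$" and j + 1 < length and content[j + 1] == "{":
--             d += 1
--             j += 2
--         elif tmpl and c == "}" and d > 0:
--             d -= 1
--             j += 1
--         else:
--             j += 1
--     return j
-- ===== Notes on version B (the rewrite author's own statement) =====
-- stated objective: alternative
-- what changed: Replaced A's single early-exiting loop (which delegates to a separate _skip_string helper with two bespoke loops) by two staged passes: pass 1 masks literals by collecting the indices of all non-literal characters with one unified literal scanner, pass 2 counts parentheses over that index list; Pre_ excludes only pos < -len(content), where A raises IndexError.
import Mathlib
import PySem

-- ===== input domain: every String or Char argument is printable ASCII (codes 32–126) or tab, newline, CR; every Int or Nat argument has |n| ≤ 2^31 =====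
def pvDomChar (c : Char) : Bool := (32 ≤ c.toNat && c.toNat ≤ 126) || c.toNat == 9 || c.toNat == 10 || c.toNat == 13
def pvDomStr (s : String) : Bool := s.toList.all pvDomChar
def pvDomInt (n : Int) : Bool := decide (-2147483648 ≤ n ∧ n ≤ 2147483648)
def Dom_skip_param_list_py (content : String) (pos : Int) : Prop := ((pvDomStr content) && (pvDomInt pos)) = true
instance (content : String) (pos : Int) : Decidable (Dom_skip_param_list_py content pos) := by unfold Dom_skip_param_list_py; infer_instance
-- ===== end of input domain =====

-- B replaces A's single early-exiting loop (which delegates to a separate string skipper) by two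
-- staged passes: pass 1 collects the indices of all non-literal characters with one unified literal
-- scanner, pass 2 counts parentheses over that index list (alternative decomposition, same cost).
-- All loops recurse on a Nat fuel set to the remaining distance to the end of the text — a pure
-- totality device: every iteration advances the index by at least 1, so the fuel never runs out
-- before the loop's own exit.

-- ===== PORT A =====
-- _skip_string, template-literal branch: the inner while-loop (i, depth = ${}-nesting)
def pvSkipTemplLoop (cs : List Char) (fuel : Nat) (i : Int) (depth : Int) : Int :=
  match fuel with
  | 0 => i
  | f + 1 =>
    if i < (cs.length : Int) then
      let ch := (PySem.List.pyGet? cs i).getD ' '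
      if ch = '\\' ∧ i + 1 < (cs.length : Int) then pvSkipTemplLoop cs f (i + 2) depth
      else if ch = '`' ∧ depth = 0 then i + 1
      else if ch = '$' ∧ i + 1 < (cs.length : Int) ∧ (PySem.List.pyGet? cs (i + 1)).getD ' ' = '{' then
        pvSkipTemplLoop cs f (i + 2) (depth + 1)
      else if ch = '}' ∧ depth > 0 then pvSkipTemplLoop cs f (i + 1) (depth - 1)
      else pvSkipTemplLoop cs f (i + 1) depth
    else i

-- _skip_string, single/double-quote branch: the second while-loop
def pvSkipPlainLoop (cs : List Char) (quote : Char) (fuel : Nat) (i : Int) : Int :=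
  match fuel with
  | 0 => i
  | f + 1 =>
    if i < (cs.length : Int) then
      let ch := (PySem.List.pyGet? cs i).getD ' '
      if ch = '\\' ∧ i + 1 < (cs.length : Int) then pvSkipPlainLoop cs quote f (i + 2)
      else if ch = quote then i + 1
      else pvSkipPlainLoop cs quote f (i + 1)
    else i

-- _skip_string  (content[pos] is in range under Pre_; outside Pre_ Python raises, the .getD default is unreachable there)
def pvSkipString (cs : List Char) (pos : Int) : Int :=
  let quote := (PySem.List.pyGet? cs pos).getD ' '
  if quote = '`' then pvSkipTemplLoop cs ((cs.length : Int) - (pos + 1)).toNat (pos + 1) 0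
  else pvSkipPlainLoop cs quote ((cs.length : Int) - (pos + 1)).toNat (pos + 1)

-- _skip_param_list's outer while-loop
def pvParamLoop (cs : List Char) (fuel : Nat) (i : Int) (depth : Int) : Int :=
  match fuel with
  | 0 => i
  | f + 1 =>
    if i < (cs.length : Int) ∧ depth > 0 then
      let ch := (PySem.List.pyGet? cs i).getD ' '
      if ch = '(' then pvParamLoop cs f (i + 1) (depth + 1)
      else if ch = ')' then pvParamLoop cs f (i + 1) (depth - 1)
      else if ch = '\'' ∨ ch = '"' ∨ ch = '`' then pvParamLoop cs f (pvSkipString cs i) depth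
      else pvParamLoop cs f (i + 1) depth
    else i

def skip_param_list_py (content : String) (pos : Int) : Option Int :=
  let cs := content.toList
  let i := pvParamLoop cs ((cs.length : Int) - pos).toNat pos 1
  if i < (cs.length : Int) then some i else none

-- ===== PORT B =====
-- _literal_end's single unified while-loop (q = opening quote, tmpl = q was a backtick, d = ${}-nesting)
def pvLitLoop (cs : List Char) (q : Char) (tmpl : Bool) (fuel : Nat) (j : Int) (d : Int) : Int :=
  match fuel with
  | 0 => j
  | f + 1 =>
    if j < (cs.length : Int) then
      let c := (PySem.List.pyGet? cs j).getD ' '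
      if c = '\\' ∧ j + 1 < (cs.length : Int) then pvLitLoop cs q tmpl f (j + 2) d
      else if c = q ∧ d = 0 then j + 1
      else if tmpl = true ∧ (c = '$' ∧ j + 1 < (cs.length : Int) ∧ (PySem.List.pyGet? cs (j + 1)).getD ' ' = '{') then
        pvLitLoop cs q tmpl f (j + 2) (d + 1)
      else if tmpl = true ∧ (c = '}' ∧ d > 0) then pvLitLoop cs q tmpl f (j + 1) (d - 1)
      else pvLitLoop cs q tmpl f (j + 1) d
    else j

-- _literal_end
def pvLiteralEnd (cs : List Char) (i : Int) : Int :=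
  let q := (PySem.List.pyGet? cs i).getD ' '
  pvLitLoop cs q (q == '`') (((cs.length : Int) - (i + 1)).toNat) (i + 1) 0

-- pass 1: the list of code (non-literal) character indices from i onward
def pvCode (cs : List Char) (fuel : Nat) (i : Int) : List Int :=
  match fuel with
  | 0 => []
  | f + 1 =>
    if i < (cs.length : Int) then
      let ch := (PySem.List.pyGet? cs i).getD ' '
      if ch = '\'' ∨ ch = '"' ∨ ch = '`' then pvCode cs f (pvLiteralEnd cs i)
      else i :: pvCode cs f (i + 1)
    else []

-- pass 2: parenthesis counting over the collected code positions
def pvScan (cs : List Char) (depth : Int) : List Int → Option Int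
  | [] => none
  | p :: rest =>
    let ch := (PySem.List.pyGet? cs p).getD ' '
    if ch = '(' then pvScan cs (depth + 1) rest
    else if ch = ')' then
      if depth - 1 = 0 then (if p + 1 < (cs.length : Int) then some (p + 1) else none)
      else pvScan cs (depth - 1) rest
    else pvScan cs depth rest

def skip_param_list_py_alt (content : String) (pos : Int) : Option Int :=
  let cs := content.toList
  pvScan cs 1 (pvCode cs ((cs.length : Int) - pos).toNat pos)

-- ===== PRECONDITION & SPEC =====
-- Pre_ excludes exactly the inputs where the Python A raises IndexError: pos < -len(content)
-- (then content[pos] is out of range; Python indexes negative pos ≥ -len with wraparound, which both ports mirror via pyGet?).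
def Pre_skip_param_list_py (content : String) (pos : Int) : Prop :=
  -(content.toList.length : Int) ≤ pos
instance (content : String) (pos : Int) : Decidable (Pre_skip_param_list_py content pos) := by
  unfold Pre_skip_param_list_py; infer_instance

def pvWitness_skip_param_list_py : String × Int := ("a, ')', `x${)}`)!", 0)

def Spec_skip_param_list_py (content : String) (pos : Int) (out : Option Int) : Prop := out = skip_param_list_py_alt content pos
instance (content : String) (pos : Int) (out : Option Int) : Decidable (Spec_skip_param_list_py content pos out) := by unfold Spec_skip_param_list_py; infer_instance

-- ===== CLAIM (what is proved, stated in full; the proofs are below) =====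
def Claim_equal_skip_param_list_py : Prop := ∀ (content : String) (pos : Int), Dom_skip_param_list_py content pos → Pre_skip_param_list_py content pos → Spec_skip_param_list_py content pos (skip_param_list_py content pos)

-- ===== LEMMAS AND PROOFS =====

-- each loop is inert once its exit condition holds, whatever the fuel
theorem pvParamLoop_stop (cs : List Char) (i depth : Int)
    (h : ¬ (i < (cs.length : Int) ∧ depth > 0)) (f : Nat) : pvParamLoop cs f i depth = i := by
  cases f <;> simp [pvParamLoop, h]

theorem pvCode_stop (cs : List Char) (i : Int)
    (h : ¬ i < (cs.length : Int)) (g : Nat) : pvCode cs g i = [] := by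
  cases g <;> simp [pvCode, h]

-- A's inner loops never move backwards
theorem pvSkipPlainLoop_ge (cs : List Char) (q : Char) : ∀ (f : Nat) (j : Int),
    j ≤ pvSkipPlainLoop cs q f j := by
  intro f
  induction f with
  | zero => intro j; simp [pvSkipPlainLoop]
  | succ f ih =>
    intro j
    by_cases hj : j < (cs.length : Int)
    case neg => rw [pvSkipPlainLoop, if_neg hj]
    rw [pvSkipPlainLoop, if_pos hj]
    dsimp only
    set ch := (PySem.List.pyGet? cs j).getD ' '
    by_cases c1 : ch = '\\' ∧ j + 1 < (cs.length : Int)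
    · rw [if_pos c1]; have := ih (j + 2); omega
    by_cases c2 : ch = q
    · rw [if_neg c1, if_pos c2]; omega
    · rw [if_neg c1, if_neg c2]; have := ih (j + 1); omega

theorem pvSkipTemplLoop_ge (cs : List Char) : ∀ (f : Nat) (j d : Int),
    j ≤ pvSkipTemplLoop cs f j d := by
  intro f
  induction f with
  | zero => intro j d; simp [pvSkipTemplLoop]
  | succ f ih =>
    intro j d
    by_cases hj : j < (cs.length : Int)
    case neg => rw [pvSkipTemplLoop, if_neg hj]
    rw [pvSkipTemplLoop, if_pos hj]
    dsimp only
    set ch := (PySem.List.pyGet? cs j).getD ' '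
    by_cases c1 : ch = '\\' ∧ j + 1 < (cs.length : Int)
    · rw [if_pos c1]; have := ih (j + 2) d; omega
    by_cases c2 : ch = '`' ∧ d = 0
    · rw [if_neg c1, if_pos c2]; omega
    by_cases c3 : ch = '$' ∧ j + 1 < (cs.length : Int) ∧ (PySem.List.pyGet? cs (j + 1)).getD ' ' = '{'
    · rw [if_neg c1, if_neg c2, if_pos c3]; have := ih (j + 2) (d + 1); omega
    by_cases c4 : ch = '}' ∧ d > 0
    · rw [if_neg c1, if_neg c2, if_neg c3, if_pos c4]; have := ih (j + 1) (d - 1); omega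
    · rw [if_neg c1, if_neg c2, if_neg c3, if_neg c4]; have := ih (j + 1) d; omega

theorem pvSkipString_ge (cs : List Char) (i : Int) : i + 1 ≤ pvSkipString cs i := by
  unfold pvSkipString
  dsimp only
  split_ifs
  · exact pvSkipTemplLoop_ge cs _ (i + 1) 0
  · exact pvSkipPlainLoop_ge cs _ _ (i + 1)

-- B's unified literal loop coincides with A's plain-quote loop when tmpl = false …
theorem pvLit_plain (cs : List Char) (q : Char) : ∀ (f : Nat) (j : Int),
    pvLitLoop cs q false f j 0 = pvSkipPlainLoop cs q f j := by
  intro f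
  induction f with
  | zero => intro j; simp [pvLitLoop, pvSkipPlainLoop]
  | succ f ih =>
    intro j
    by_cases hj : j < (cs.length : Int)
    case neg => rw [pvLitLoop, pvSkipPlainLoop, if_neg hj, if_neg hj]
    rw [pvLitLoop, pvSkipPlainLoop, if_pos hj, if_pos hj]
    dsimp only
    set c := (PySem.List.pyGet? cs j).getD ' ' with hc
    by_cases c1 : c = '\\' ∧ j + 1 < (cs.length : Int)
    · rw [if_pos c1, if_pos c1, ih]
    by_cases c2 : c = q
    · rw [if_neg c1, if_pos (show c = q ∧ (0 : Int) = 0 from ⟨c2, rfl⟩), if_neg c1, if_pos c2]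
    · have h2 : ¬ (c = q ∧ (0 : Int) = 0) := fun h => c2 h.1
      have h3 : ¬ ((false = true) ∧ (c = '$' ∧ j + 1 < (cs.length : Int) ∧ (PySem.List.pyGet? cs (j + 1)).getD ' ' = '{')) := by
        simp
      have h4 : ¬ ((false = true) ∧ (c = '}' ∧ (0 : Int) > 0)) := by simp
      rw [if_neg c1, if_neg h2, if_neg h3, if_neg h4, if_neg c1, if_neg c2, ih]

-- … and with A's template loop when tmpl = true (then q is the backtick)
theorem pvLit_templ (cs : List Char) : ∀ (f : Nat) (j d : Int),
    pvLitLoop cs '`' true f j d = pvSkipTemplLoop cs f j d := by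
  intro f
  induction f with
  | zero => intro j d; simp [pvLitLoop, pvSkipTemplLoop]
  | succ f ih =>
    intro j d
    by_cases hj : j < (cs.length : Int)
    case neg => rw [pvLitLoop, pvSkipTemplLoop, if_neg hj, if_neg hj]
    rw [pvLitLoop, pvSkipTemplLoop, if_pos hj, if_pos hj]
    dsimp only
    set c := (PySem.List.pyGet? cs j).getD ' ' with hc
    by_cases c1 : c = '\\' ∧ j + 1 < (cs.length : Int)
    · rw [if_pos c1, if_pos c1, ih]
    by_cases c2 : c = '`' ∧ d = 0
    · rw [if_neg c1, if_pos c2, if_neg c1, if_pos c2]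
    by_cases c3 : c = '$' ∧ j + 1 < (cs.length : Int) ∧ (PySem.List.pyGet? cs (j + 1)).getD ' ' = '{'
    · rw [if_neg c1, if_neg c2, if_pos (show (true = true) ∧ _ from ⟨rfl, c3⟩),
          if_neg c1, if_neg c2, if_pos c3, ih]
    by_cases c4 : c = '}' ∧ d > 0
    · have h3 : ¬ ((true = true) ∧ (c = '$' ∧ j + 1 < (cs.length : Int) ∧ (PySem.List.pyGet? cs (j + 1)).getD ' ' = '{')) :=
        fun h => c3 h.2
      rw [if_neg c1, if_neg c2, if_neg h3, if_pos (show (true = true) ∧ (c = '}' ∧ d > 0) from ⟨rfl, c4⟩),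
          if_neg c1, if_neg c2, if_neg c3, if_pos c4, ih]
    · have h3 : ¬ ((true = true) ∧ (c = '$' ∧ j + 1 < (cs.length : Int) ∧ (PySem.List.pyGet? cs (j + 1)).getD ' ' = '{')) :=
        fun h => c3 h.2
      have h4 : ¬ ((true = true) ∧ (c = '}' ∧ d > 0)) := fun h => c4 h.2
      rw [if_neg c1, if_neg c2, if_neg h3, if_neg h4,
          if_neg c1, if_neg c2, if_neg c3, if_neg c4, ih]

-- B's _literal_end computes exactly A's _skip_string
theorem pvLiteralEnd_eq (cs : List Char) (i : Int) : pvLiteralEnd cs i = pvSkipString cs i := by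
  unfold pvLiteralEnd pvSkipString
  dsimp only
  set q := (PySem.List.pyGet? cs i).getD ' ' with hq
  by_cases h : q = '`'
  · rw [if_pos h, h]
    simp only [beq_self_eq_true]
    exact pvLit_templ cs _ (i + 1) 0
  · rw [if_neg h]
    have : (q == '`') = false := by simp [h]
    rw [this]
    exact pvLit_plain cs q _ (i + 1)

-- Simulation: A's early-exiting paren loop equals B's scan of the precomputed code-index list,
-- by strong induction on the remaining distance (the fuel hypotheses say each fuel covers it).
theorem pvMain (n : Nat) : ∀ (cs : List Char) (i depth : Int) (f g : Nat),
    ((cs.length : Int) - i).toNat ≤ n →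
    ((cs.length : Int) - i).toNat ≤ f →
    ((cs.length : Int) - i).toNat ≤ g →
    depth > 0 →
    (if pvParamLoop cs f i depth < (cs.length : Int) then some (pvParamLoop cs f i depth) else none)
      = pvScan cs depth (pvCode cs g i) := by
  induction n with
  | zero =>
    intro cs i depth f g hn hf hg hd
    have hge : ¬ i < (cs.length : Int) := by omega
    have hc : ¬ (i < (cs.length : Int) ∧ depth > 0) := by omega
    rw [pvParamLoop_stop cs i depth hc, pvCode_stop cs i hge, if_neg hge]
    rfl
  | succ n ih =>
    intro cs i depth f g hn hf hg hd
    by_cases hlt : i < (cs.length : Int)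
    case neg =>
      have hc : ¬ (i < (cs.length : Int) ∧ depth > 0) := by omega
      rw [pvParamLoop_stop cs i depth hc, pvCode_stop cs i hlt, if_neg hlt]
      rfl
    have hdist : 1 ≤ ((cs.length : Int) - i).toNat := by omega
    have h1 : ((cs.length : Int) - (i + 1)).toNat ≤ n := by omega
    obtain ⟨f, rfl⟩ : ∃ f', f = f' + 1 := ⟨f - 1, by omega⟩
    obtain ⟨g, rfl⟩ : ∃ g', g = g' + 1 := ⟨g - 1, by omega⟩
    rw [pvParamLoop, pvCode, if_pos (show i < (cs.length : Int) ∧ depth > 0 from ⟨hlt, hd⟩), if_pos hlt]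
    dsimp only
    set ch := (PySem.List.pyGet? cs i).getD ' ' with hch
    by_cases c1 : ch = '('
    · have hq : ¬ (ch = '\'' ∨ ch = '"' ∨ ch = '`') := by simp [c1]
      rw [if_pos c1, if_neg hq]
      rw [show pvScan cs depth (i :: pvCode cs g (i + 1))
            = pvScan cs (depth + 1) (pvCode cs g (i + 1)) by
          simp [pvScan, ← hch, c1]]
      exact ih cs (i + 1) (depth + 1) f g h1 (by omega) (by omega) (by omega)
    by_cases c2 : ch = ')'
    · have hq : ¬ (ch = '\'' ∨ ch = '"' ∨ ch = '`') := by simp [c2]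
      rw [if_neg c1, if_pos c2, if_neg hq]
      by_cases hz : depth - 1 = 0
      · have hc0 : ¬ (i + 1 < (cs.length : Int) ∧ depth - 1 > 0) := by omega
        rw [pvParamLoop_stop cs (i + 1) (depth - 1) hc0]
        simp [pvScan, ← hch, c2, hz]
      · rw [show pvScan cs depth (i :: pvCode cs g (i + 1))
              = pvScan cs (depth - 1) (pvCode cs g (i + 1)) by
            simp [pvScan, ← hch, c2, hz]]
        exact ih cs (i + 1) (depth - 1) f g h1 (by omega) (by omega) (by omega)
    by_cases c3 : ch = '\'' ∨ ch = '"' ∨ ch = '`'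
    · rw [if_neg c1, if_neg c2, if_pos c3, if_pos c3, pvLiteralEnd_eq]
      have hjge : i + 1 ≤ pvSkipString cs i := pvSkipString_ge cs i
      exact ih cs (pvSkipString cs i) depth f g (by omega) (by omega) (by omega) hd
    · rw [if_neg c1, if_neg c2, if_neg c3, if_neg c3]
      rw [show pvScan cs depth (i :: pvCode cs g (i + 1))
            = pvScan cs depth (pvCode cs g (i + 1)) by
          simp [pvScan, ← hch, c1, c2]]
      exact ih cs (i + 1) depth f g h1 (by omega) (by omega) (by omega)

-- ===== VERDICT (by name: the statement is the Claim_ definition above) =====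
theorem skip_param_list_py_spec : Claim_equal_skip_param_list_py := by
  intro content pos _ _
  unfold Spec_skip_param_list_py skip_param_list_py skip_param_list_py_alt
  dsimp only
  exact pvMain ((content.toList.length : Int) - pos).toNat content.toList pos 1
    ((content.toList.length : Int) - pos).toNat ((content.toList.length : Int) - pos).toNat
    le_rfl le_rfl le_rfl (by omega)
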